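-- pv_equiv track=rewrite | github.com/naman131001/Utility-Chatbot | tests/chunker_figs_tabs.py | _process_table_to_text
-- ===== SOURCE A (Python) =====
-- def _process_table_to_text(rows: list[list[str]]) -> str:
--     fields: dict[str, str] = {}
--     for row in rows:
--         if len(row) >= 2:
--             key = row[0].rstrip(':').strip()
--             val = " ".join(row[1:]).strip()
--             if key and val:
--                 fields[key] = val
--         elif len(row) == 1 and row[0] and fields:
--             last = list(fields)[-1]
--             fields[last] += " " + row[0]
--     priority = [
--         "PROCESS NUMBER", "PROCESS NAME", "PROCESS DEFINITION",
--         "TRIGGER(S)", "PROCESS RULES", "PROCESS INPUTS", "PROCESS OUTPUTS",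
--         "SUB OR PRECEDING PROCESSES", "COMMENTS", "COMMENT",
--     ]
--     seen: set[str] = set()
--     lines: list[str] = []
--     for k in priority:
--         if k in fields:
--             lines.append(f"{k}: {fields[k]}")
--             seen.add(k)
--     for k, v in fields.items():
--         if k not in seen:
--             lines.append(f"{k}: {v}")
--     return "\n".join(lines)
-- ===== SOURCE B (Python) =====
-- def _parse_fields(rows: list[list[str]]) -> dict[str, str]:
--     fields: dict[str, str] = {}
--     for row in rows:
--         if len(row) >= 2:
--             key = row[0].rstrip(':').strip()
--             val = " ".join(row[1:]).strip()
--             if key and val: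
--                 fields[key] = val
--         elif len(row) == 1 and row[0] and fields:
--             last = list(fields)[-1]
--             fields[last] += " " + row[0]
--     return fields
--
--
-- _PRIORITY = [
--     "PROCESS NUMBER", "PROCESS NAME", "PROCESS DEFINITION",
--     "TRIGGER(S)", "PROCESS RULES", "PROCESS INPUTS", "PROCESS OUTPUTS",
--     "SUB OR PRECEDING PROCESSES", "COMMENTS", "COMMENT",
-- ]
--
-- _RANK = {k: i for i, k in enumerate(_PRIORITY)}
--
--
-- def _process_table_to_text(rows: list[list[str]]) -> str:
--     fields = _parse_fields(rows)
--     ordered = sorted(fields.items(), key=lambda kv: _RANK.get(kv[0], len(_PRIORITY)))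
--     return "\n".join(f"{k}: {v}" for k, v in ordered)
-- ===== Notes on version B (the rewrite author's own statement) =====
-- stated objective: idiomatic
-- what changed: The output phase's two scans (a priority pass that also fills a `seen` set, then a leftover pass over the dict) are replaced by a single stable sort of the parsed items under a precomputed rank table, formatted and joined in one expression; the parsing loop is unchanged.
import Mathlib
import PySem

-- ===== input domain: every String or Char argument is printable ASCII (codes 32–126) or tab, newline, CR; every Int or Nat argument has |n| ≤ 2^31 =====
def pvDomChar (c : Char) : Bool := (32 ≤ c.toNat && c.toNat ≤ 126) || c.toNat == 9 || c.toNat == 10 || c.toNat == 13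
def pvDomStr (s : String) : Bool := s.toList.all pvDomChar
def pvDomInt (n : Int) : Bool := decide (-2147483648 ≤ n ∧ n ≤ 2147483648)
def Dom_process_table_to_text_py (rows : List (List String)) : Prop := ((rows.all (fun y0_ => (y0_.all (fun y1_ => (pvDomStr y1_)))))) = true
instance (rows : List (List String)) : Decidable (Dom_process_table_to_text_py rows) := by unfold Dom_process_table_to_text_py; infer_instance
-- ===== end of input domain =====

-- B replaces A's two output scans (priority pass with a `seen` set + leftover pass) by one
-- stable sort of the parsed items under a rank table; objective: idiomatic. Parsing is unchanged.

-- ===== PORT A =====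
-- shared helper: Python's  s.rstrip(':')  (drop trailing ':' characters; exact)
def rstripColon (s : String) : String :=
  String.ofList ((s.toList.reverse.dropWhile (fun c => c == ':')).reverse)

-- the priority list literal (same literal in both Pythons)
def priorityList : List String :=
  ["PROCESS NUMBER", "PROCESS NAME", "PROCESS DEFINITION",
   "TRIGGER(S)", "PROCESS RULES", "PROCESS INPUTS", "PROCESS OUTPUTS",
   "SUB OR PRECEDING PROCESSES", "COMMENTS", "COMMENT"]

-- body of the parsing loop (identical in A and in B's `_parse_fields`)
def parseStep (fields : PySem.Dict String String) (row : List String) : PySem.Dict String String :=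
  if 2 ≤ row.length then
    let key := PySem.Str.strip (rstripColon (row.headD ""))
    let val := PySem.Str.strip (PySem.Str.join " " (PySem.List.slice row (some 1) none))
    if key ≠ "" ∧ val ≠ "" then fields.insert key val else fields
  else if row.length = 1 ∧ row.headD "" ≠ "" ∧ fields.size ≠ 0 then
    fields.modify (fields.keys.getLastD "") "" (fun v => v ++ " " ++ row.headD "")
  else fields

def process_table_to_text_py (rows : List (List String)) : String :=
  let fields := rows.foldl parseStep PySem.Dict.empty
  let res := priorityList.foldl
    (fun st k =>
      if fields.contains k then (st.1 ++ [k ++ ": " ++ fields.getD k ""], PySem.Set.add st.2 k) else st)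
    (([] : List String), ([] : PySem.Set String))
  let lines := fields.items.foldl
    (fun ls p => if !res.2.contains p.1 then ls ++ [p.1 ++ ": " ++ p.2] else ls) res.1
  PySem.Str.join "\n" lines

-- ===== PORT B =====
def parseFields (rows : List (List String)) : PySem.Dict String String :=
  rows.foldl parseStep PySem.Dict.empty

-- _RANK = {k: i for i, k in enumerate(_PRIORITY)}
def rankDict : PySem.Dict String Int :=
  (PySem.List.enumerate priorityList 0).foldl (fun d p => d.insert p.2 p.1) PySem.Dict.empty

def process_table_to_text_py_alt (rows : List (List String)) : String :=
  let fields := parseFields rows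
  let ordered := PySem.List.sorted fields.items
    (fun kv => rankDict.getD kv.1 (priorityList.length : Int)) false
  PySem.Str.join "\n" (ordered.map (fun kv => kv.1 ++ ": " ++ kv.2))

-- ===== PRECONDITION & SPEC =====
def Spec_process_table_to_text_py (rows : List (List String)) (out : String) : Prop := out = process_table_to_text_py_alt rows
instance (rows : List (List String)) (out : String) : Decidable (Spec_process_table_to_text_py rows out) := by unfold Spec_process_table_to_text_py; infer_instance

-- ===== CLAIM (what is proved, stated in full; the proofs are below) =====
def Claim_equal_process_table_to_text_py : Prop := ∀ (rows : List (List String)), Dom_process_table_to_text_py rows → Spec_process_table_to_text_py rows (process_table_to_text_py rows)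

-- ===== LEMMAS AND PROOFS =====

-- parseStep preserves distinctness of the dict keys
theorem nodup_keys_parseStep (d : PySem.Dict String String) (row : List String)
    (h : d.keys.Nodup) : (parseStep d row).keys.Nodup := by
  unfold parseStep
  dsimp only
  split
  · split
    · exact PySem.Dict.nodup_keys_insert _ _ _ h
    · exact h
  · split
    · rw [PySem.Dict.keys_modify]
      exact PySem.Dict.nodup_keys_insert _ _ _ h
    · exact h

theorem nodup_keys_parse_aux (rows : List (List String)) :
    ∀ (d : PySem.Dict String String), d.keys.Nodup → (rows.foldl parseStep d).keys.Nodup := by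
  induction rows with
  | nil => intro d h; simpa using h
  | cons r rs ih =>
    intro d h
    simpa using ih _ (nodup_keys_parseStep d r h)

theorem nodup_keys_parse (rows : List (List String)) :
    (parseFields rows).keys.Nodup := by
  apply nodup_keys_parse_aux
  exact PySem.Dict.nodup_keys_empty

-- the rank dict looks up the position in the priority list
theorem rank_get? (P : List String) (hP : P.Nodup) (k : String) :
    ((PySem.List.enumerate P 0).foldl (fun d p => d.insert p.2 p.1) PySem.Dict.empty).get? k
      = (PySem.List.index? P k).map (fun (n : Nat) => (n : Int)) := by
  induction P using List.reverseRecOn with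
  | nil => rfl
  | append_singleton P a ih =>
    have hP' : P.Nodup := (List.nodup_append.mp hP).1
    have ha : a ∉ P := by
      intro hmem
      exact List.disjoint_of_nodup_append hP hmem (by simp)
    rw [PySem.List.enumerate_append, List.foldl_append]
    have h1 : PySem.List.enumerate [a] (0 + (P.length : Int)) = [((0 + (P.length : Int)), a)] := by
      simp [PySem.List.enumerate]
    rw [h1]
    simp only [List.foldl_cons, List.foldl_nil]
    rw [PySem.Dict.get?_insert]
    by_cases hka : k = a
    · subst hka
      rw [if_pos rfl, PySem.List.index?_append_singleton_self P k ha]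
      simp
    · rw [if_neg hka]
      by_cases hkP : k ∈ P
      · rw [PySem.List.index?_append_of_mem _ hkP, ih hP']
      · have h2 : k ∉ P ++ [a] := by simp [hkP, hka]
        rw [ih hP', (PySem.List.index?_eq_none_iff _ _).mpr hkP,
            (PySem.List.index?_eq_none_iff _ _).mpr h2]

theorem index?_eq_some_iff_getElem (P : List String) (hP : P.Nodup) (i : Nat)
    (hi : i < P.length) (k : String) :
    PySem.List.index? P k = some i ↔ P[i] = k := by
  constructor
  · intro h
    obtain ⟨hk, hPk, -⟩ := PySem.List.getElem_of_index?_eq_some h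
    exact hPk
  · intro h
    have hkP : k ∈ P := h ▸ List.getElem_mem hi
    obtain ⟨j, hj⟩ := Option.isSome_iff_exists.mp ((PySem.List.index?_isSome_iff _ _).mpr hkP)
    obtain ⟨hjlt, hPj, -⟩ := PySem.List.getElem_of_index?_eq_some hj
    have hij : j = i := (List.Nodup.getElem_inj_iff hP).mp (by rw [hPj, h])
    exact hij ▸ hj

-- insertBy walks past elements it is not `before`
theorem insertBy_append_no {α : Type} (before : α → α → Bool) (x : α) (ys zs : List α)
    (h : ∀ y ∈ ys, before x y = false) :
    PySem.List.insertBy before x (ys ++ zs) = ys ++ PySem.List.insertBy before x zs := by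
  induction ys with
  | nil => simp
  | cons y ys ih =>
    have hy : before x y = false := h y (by simp)
    simp only [List.cons_append, PySem.List.insertBy, hy, Bool.false_eq_true, if_false]
    rw [ih (fun z hz => h z (by simp [hz]))]

theorem insertBy_front {α : Type} (before : α → α → Bool) (x : α) (zs : List α)
    (h : ∀ y ∈ zs, before x y = true) :
    PySem.List.insertBy before x zs = x :: zs := by
  cases zs with
  | nil => simp [PySem.List.insertBy]
  | cons z zs => simp [PySem.List.insertBy, h z (by simp)]

theorem flatMap_congr_mem {α β : Type} (l : List α) (f g : α → List β)
    (h : ∀ a ∈ l, f a = g a) : l.flatMap f = l.flatMap g := by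
  induction l with
  | nil => simp
  | cons a l ih =>
    simp only [List.flatMap_cons]
    rw [h a (by simp), ih (fun b hb => h b (by simp [hb]))]

theorem flatMap_range_getD {α β : Type} (P : List α) (dflt : α) (g : α → List β) :
    (List.range P.length).flatMap (fun i => g (P.getD i dflt)) = P.flatMap g := by
  induction P with
  | nil => simp
  | cons a P ih =>
    rw [List.length_cons, List.range_succ_eq_map, List.flatMap_cons, List.flatMap_map,
        List.flatMap_cons]
    congr 1

-- stability: a sort by an Int key with values in [0, N] is the concatenation of the key buckets
theorem sorted_buckets {α : Type} (l : List α) (key : α → Int) (N : Nat)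
    (h : ∀ x ∈ l, 0 ≤ key x ∧ key x ≤ N) :
    PySem.List.sorted l key false
      = (List.range (N + 1)).flatMap (fun (i : Nat) => l.filter (fun x => key x == (i : Int))) := by
  induction l using List.reverseRecOn with
  | nil => simp [PySem.List.sorted_eq_foldl_insertBy]
  | append_singleton l x ih =>
    have hl : ∀ y ∈ l, 0 ≤ key y ∧ key y ≤ N := fun y hy => h y (by simp [hy])
    have hx := h x (by simp)
    have hsing : PySem.List.sorted (l ++ [x]) key false
        = PySem.List.insertBy (fun a b => decide (key a < key b)) x (PySem.List.sorted l key false) := by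
      rw [PySem.List.sorted_eq_foldl_insertBy, PySem.List.sorted_eq_foldl_insertBy,
          List.foldl_append]
      simp
    rw [hsing, ih hl]
    obtain ⟨k, hkx, hkN⟩ : ∃ k : Nat, key x = (k : Int) ∧ k ≤ N :=
      ⟨(key x).toNat, by omega, by omega⟩
    have hNsplit : N + 1 = (k + 1) + (N - k) := by omega
    have hrange : List.range (N + 1)
        = List.range (k + 1) ++ (List.range (N - k)).map (fun j => (k + 1) + j) := by
      rw [hNsplit, List.range_add]
    have hmemF : ∀ (i : Nat) (y : α), y ∈ l.filter (fun y => key y == (i : Int)) → key y = (i : Int) := by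
      intro i y hy
      simpa using List.of_mem_filter hy
    have hF'eq : ∀ i : Nat, (l ++ [x]).filter (fun y => key y == (i : Int))
        = l.filter (fun y => key y == (i : Int)) ++ (if i = k then [x] else []) := by
      intro i
      rw [List.filter_append]
      congr 1
      by_cases hik : i = k
      · subst hik
        simp [hkx]
      · have hfalse : (key x == (i : Int)) = false := by
          rw [hkx]
          simp only [beq_eq_false_iff_ne, ne_eq, Nat.cast_inj]
          intro hh
          exact hik hh.symm
        simp [hfalse, hik]
    rw [hrange, List.flatMap_append, List.flatMap_append]
    rw [insertBy_append_no _ x _ _ ?hno]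
    case hno =>
      intro y hy
      obtain ⟨i, hi, hyF⟩ := List.mem_flatMap.mp hy
      have hik : i ≤ k := by
        have := List.mem_range.mp hi
        omega
      have hkey := hmemF i y hyF
      simp only [decide_eq_false_iff_not, not_lt]
      rw [hkey, hkx]
      exact_mod_cast hik
    rw [insertBy_front _ x _ ?hyes]
    case hyes =>
      intro y hy
      obtain ⟨i, hi, hyF⟩ := List.mem_flatMap.mp hy
      obtain ⟨j, hj, hij⟩ := List.mem_map.mp hi
      have hkey := hmemF i y hyF
      simp only [decide_eq_true_eq]
      rw [hkey, hkx]
      have : k < i := by omega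
      exact_mod_cast this
    have h1 : (List.range (k + 1)).flatMap (fun (i : Nat) => (l ++ [x]).filter (fun y => key y == (i : Int)))
        = (List.range k).flatMap (fun (i : Nat) => l.filter (fun y => key y == (i : Int)))
          ++ (l.filter (fun y => key y == (k : Int)) ++ [x]) := by
      rw [List.range_succ, List.flatMap_append]
      congr 1
      · apply flatMap_congr_mem
        intro i hi
        have : i < k := List.mem_range.mp hi
        rw [hF'eq i, if_neg (by omega)]
        simp
      · simp only [List.flatMap_cons, List.flatMap_nil, List.append_nil]
        rw [hF'eq k, if_pos rfl]
    have h2 : ((List.range (N - k)).map (fun j => (k + 1) + j)).flatMap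
          (fun (i : Nat) => (l ++ [x]).filter (fun y => key y == (i : Int)))
        = ((List.range (N - k)).map (fun j => (k + 1) + j)).flatMap
          (fun (i : Nat) => l.filter (fun y => key y == (i : Int))) := by
      apply flatMap_congr_mem
      intro i hi
      obtain ⟨j, hj, hij⟩ := List.mem_map.mp hi
      rw [hF'eq i, if_neg (by omega)]
      simp
    rw [h1, h2, List.range_succ, List.flatMap_append]
    simp [List.append_assoc]

-- filtering an items list with distinct keys by one key is a lookup
theorem filter_fst_eq (l : List (String × String)) (hn : (l.map Prod.fst).Nodup) (c : String) :
    l.filter (fun p => p.1 == c)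
      = match (PySem.Dict.mk l).get? c with | some v => [(c, v)] | none => [] := by
  induction l with
  | nil => simp [PySem.Dict.get?]
  | cons p t ih =>
    obtain ⟨k, v⟩ := p
    rw [PySem.Dict.get?_mk_cons]
    simp only [List.map_cons, List.nodup_cons] at hn
    by_cases hkc : k = c
    · subst hkc
      have htail : t.filter (fun p => p.1 == k) = [] := by
        rw [List.filter_eq_nil_iff]
        intro p hp
        simp only [beq_iff_eq]
        intro hpk
        exact hn.1 (hpk ▸ List.mem_map_of_mem hp)
      simp [htail]
    · rw [List.filter_cons]
      have hb : ((k, v).1 == c) = false := by simpa using hkc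
      rw [hb]
      simp only [Bool.false_eq_true, if_false]
      exact ih hn.2

-- A's priority loop, characterised
theorem loopA (d : PySem.Dict String String) (P : List String) (ls : List String)
    (s : PySem.Set String) :
    P.foldl (fun st k =>
        if d.contains k then (st.1 ++ [k ++ ": " ++ d.getD k ""], PySem.Set.add st.2 k) else st) (ls, s)
      = (ls ++ P.flatMap (fun k => if d.contains k then [k ++ ": " ++ d.getD k ""] else []),
         P.foldl (fun t k => if d.contains k then PySem.Set.add t k else t) s) := by
  induction P generalizing ls s with
  | nil => simp
  | cons q P ih =>
    simp only [List.foldl_cons, List.flatMap_cons]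
    by_cases hq : d.contains q
    · rw [if_pos hq, ih, if_pos hq, if_pos hq]
      simp [List.append_assoc]
    · rw [if_neg hq, ih, if_neg hq, if_neg hq]
      simp

theorem mem_loopA_seen (d : PySem.Dict String String) (P : List String) (s : PySem.Set String)
    (k : String) :
    k ∈ P.foldl (fun t k => if d.contains k then PySem.Set.add t k else t) s
      ↔ k ∈ s ∨ (k ∈ P ∧ d.contains k) := by
  induction P generalizing s with
  | nil => simp
  | cons q P ih =>
    simp only [List.foldl_cons]
    by_cases hq : d.contains q
    · rw [if_pos hq, ih, PySem.Set.mem_add]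
      constructor
      · rintro ((h | rfl) | ⟨h1, h2⟩)
        · exact Or.inl h
        · exact Or.inr ⟨by simp, hq⟩
        · exact Or.inr ⟨by simp [h1], h2⟩
      · rintro (h | ⟨h1, h2⟩)
        · exact Or.inl (Or.inl h)
        · rcases List.mem_cons.mp h1 with rfl | h1
          · exact Or.inl (Or.inr rfl)
          · exact Or.inr ⟨h1, h2⟩
    · rw [if_neg hq, ih]
      constructor
      · rintro (h | ⟨h1, h2⟩)
        · exact Or.inl h
        · exact Or.inr ⟨by simp [h1], h2⟩
      · rintro (h | ⟨h1, h2⟩)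
        · exact Or.inl h
        · rcases List.mem_cons.mp h1 with rfl | h1
          · exact absurd h2 (by simp [hq])
          · exact Or.inr ⟨h1, h2⟩

-- B's sort key is the position in the priority list (or its length)
theorem rank_getD (k : String) :
    rankDict.getD k (priorityList.length : Int)
      = ((PySem.List.index? priorityList k).map (fun (n : Nat) => (n : Int))).getD
          (priorityList.length : Int) := by
  rw [PySem.Dict.getD_eq_get?_getD]
  have hr : rankDict
      = (PySem.List.enumerate priorityList 0).foldl (fun d p => d.insert p.2 p.1)
          PySem.Dict.empty := rfl
  rw [hr, rank_get? priorityList (by decide)]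

theorem keyB_bounds (k : String) :
    0 ≤ rankDict.getD k (priorityList.length : Int)
      ∧ rankDict.getD k (priorityList.length : Int) ≤ ((priorityList.length : Nat) : Int) := by
  rw [rank_getD]
  cases hq : PySem.List.index? priorityList k with
  | none => simp
  | some i =>
    obtain ⟨hi, -, -⟩ := PySem.List.getElem_of_index?_eq_some hq
    simp only [Option.map_some, Option.getD_some]
    constructor
    · exact_mod_cast Nat.zero_le i
    · exact_mod_cast Nat.le_of_lt hi

-- one priority bucket of the sort is A's lookup line for that priority key
theorem bucket_eq (d : PySem.Dict String String) (hn : d.keys.Nodup) (i : Nat)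
    (hi : i < priorityList.length) :
    d.items.filter (fun kv => rankDict.getD kv.1 (priorityList.length : Int) == (i : Int))
      = (if d.contains (priorityList.getD i "") then
          [(priorityList.getD i "", d.getD (priorityList.getD i "") "")] else []) := by
  have hP : priorityList.Nodup := by decide
  have hPi : priorityList.getD i "" = priorityList[i] := List.getD_eq_getElem priorityList "" hi
  have hstep : ∀ kv : String × String,
      (rankDict.getD kv.1 (priorityList.length : Int) == (i : Int))
        = (kv.1 == priorityList.getD i "") := by
    intro kv
    rw [rank_getD, hPi]
    cases hq : PySem.List.index? priorityList kv.1 with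
    | none =>
      have hnm : kv.1 ∉ priorityList := (PySem.List.index?_eq_none_iff _ _).mp hq
      have h1 : (((priorityList.length : Nat) : Int) == (i : Int)) = false := by
        simp only [beq_eq_false_iff_ne, ne_eq, Int.natCast_inj]
        omega
      have h2 : (kv.1 == priorityList[i]) = false := by
        simp only [beq_eq_false_iff_ne, ne_eq]
        intro hkv
        exact hnm (hkv ▸ List.getElem_mem hi)
      simp [h1, h2]
    | some j =>
      simp only [Option.map_some, Option.getD_some]
      by_cases hji : j = i
      · subst hji
        have := (index?_eq_some_iff_getElem priorityList hP j
          (by obtain ⟨h, -, -⟩ := PySem.List.getElem_of_index?_eq_some hq; exact h) kv.1).mp hq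
        simp [this]
      · have h1 : (((j : Nat) : Int) == (i : Int)) = false := by
          simp only [beq_eq_false_iff_ne, ne_eq, Int.natCast_inj]
          omega
        have h2 : (kv.1 == priorityList[i]) = false := by
          simp only [beq_eq_false_iff_ne, ne_eq]
          intro hkv
          have hsome : PySem.List.index? priorityList kv.1 = some i :=
            (index?_eq_some_iff_getElem priorityList hP i hi kv.1).mpr hkv.symm
          rw [hq] at hsome
          exact hji (Option.some_inj.mp hsome)
        simp [h1, h2]
  rw [List.filter_congr (fun p _ => hstep p)]
  have hnis : (d.items.map Prod.fst).Nodup := hn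
  rw [filter_fst_eq d.items hnis (priorityList.getD i "")]
  have hmk : PySem.Dict.mk d.items = d := rfl
  rw [hmk]
  cases hq : d.get? (priorityList.getD i "") with
  | none =>
    have hcf : d.contains (priorityList.getD i "") = false := by
      rw [PySem.Dict.contains_eq_isSome_get?, hq]
      rfl
    rw [hcf]
    simp
  | some v =>
    have hc : d.contains (priorityList.getD i "") = true := by
      rw [PySem.Dict.contains_eq_isSome_get?, hq]
      rfl
    have hg : d.getD (priorityList.getD i "") "" = v := PySem.Dict.getD_of_get?_eq_some d "" hq
    rw [hc, hg]
    simp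

-- the two line lists coincide
theorem lines_eq (d : PySem.Dict String String) (hn : d.keys.Nodup) :
    d.items.foldl
      (fun ls p => if !(priorityList.foldl
          (fun st k => if d.contains k
            then (st.1 ++ [k ++ ": " ++ d.getD k ""], PySem.Set.add st.2 k) else st)
          (([] : List String), ([] : PySem.Set String))).2.contains p.1
        then ls ++ [p.1 ++ ": " ++ p.2] else ls)
      (priorityList.foldl
          (fun st k => if d.contains k
            then (st.1 ++ [k ++ ": " ++ d.getD k ""], PySem.Set.add st.2 k) else st)
          (([] : List String), ([] : PySem.Set String))).1
    = (PySem.List.sorted d.items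
        (fun kv => rankDict.getD kv.1 (priorityList.length : Int)) false).map
        (fun kv => kv.1 ++ ": " ++ kv.2) := by
  rw [loopA]
  dsimp only
  simp only [PySem.List.foldl_append_if]
  rw [sorted_buckets d.items _ priorityList.length
    (fun kv _ => keyB_bounds kv.1)]
  rw [List.map_flatMap, List.range_succ, List.flatMap_append]
  simp only [List.flatMap_cons, List.flatMap_nil, List.append_nil, List.nil_append]
  congr 1
  · -- priority buckets
    rw [← flatMap_range_getD priorityList ""
      (fun k => if d.contains k then [k ++ ": " ++ d.getD k ""] else [])]
    apply flatMap_congr_mem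
    intro i hi
    dsimp only
    rw [bucket_eq d hn i (List.mem_range.mp hi)]
    split <;> simp
  · -- leftover items
    congr 1
    apply List.filter_congr
    intro p hp
    have hcp : d.contains p.1 = true :=
      (PySem.Dict.contains_iff_mem_keys d p.1).mpr (PySem.Dict.mem_keys_of_mem_items d hp)
    have hseen : p.1 ∈ priorityList.foldl
        (fun t k => if d.contains k then PySem.Set.add t k else t) ([] : PySem.Set String)
        ↔ p.1 ∈ priorityList := by
      rw [mem_loopA_seen]
      simp [hcp]
    rw [rank_getD]
    cases hq : PySem.List.index? priorityList p.1 with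
    | none =>
      have hnm : p.1 ∉ priorityList := (PySem.List.index?_eq_none_iff _ _).mp hq
      have hns : p.1 ∉ priorityList.foldl
          (fun t k => if d.contains k then PySem.Set.add t k else t)
          ([] : PySem.Set String) := fun hmem => hnm (hseen.mp hmem)
      simp [hns]
    | some j =>
      obtain ⟨hjlt, -, -⟩ := PySem.List.getElem_of_index?_eq_some hq
      have hm : p.1 ∈ priorityList := (PySem.List.index?_isSome_iff _ _).mp (by rw [hq]; rfl)
      have hms : p.1 ∈ priorityList.foldl
          (fun t k => if d.contains k then PySem.Set.add t k else t)
          ([] : PySem.Set String) := hseen.mpr hm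
      have hne : (((j : Nat) : Int) == ((priorityList.length : Nat) : Int)) = false := by
        simp only [beq_eq_false_iff_ne, ne_eq, Int.natCast_inj]
        omega
      simp [hms, hne]

-- ===== VERDICT (by name: the statement is the Claim_ definition above) =====
theorem process_table_to_text_py_spec : Claim_equal_process_table_to_text_py := by
  intro rows _
  show process_table_to_text_py rows = process_table_to_text_py_alt rows
  unfold process_table_to_text_py process_table_to_text_py_alt parseFields
  dsimp only
  exact congrArg (PySem.Str.join "\n")
    (lines_eq (rows.foldl parseStep PySem.Dict.empty)
      (nodup_keys_parse rows))
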